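-- pv_equiv track=rewrite | github.com/cKompella/python-basics | src/dictionaries_challenges.py | count_first_letter
-- ===== SOURCE A (Python) =====
-- def count_first_letter(names):
--   letters = {}
--   for key in names:
--     first_letter = key[0]
--     if first_letter not in letters:
--       letters[first_letter] = 0
--     letters[first_letter] += len(names[key])
--   return letters
-- ===== SOURCE B (Python) =====
-- def count_first_letter(names):
--   order = dict.fromkeys(key[0] for key in names)
--   return {c: sum(len(v) for k, v in names.items() if k[0] == c) for c in order}
-- ===== Notes on version B (the rewrite author's own statement) =====
-- stated objective: simpler
-- what changed: A's single pass with conditional bucket initialisation and in-place += is replaced by an ordered dedup of the first letters (dict.fromkeys) followed by a dict comprehension that sums len(names[k]) per letter.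
import Mathlib
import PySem

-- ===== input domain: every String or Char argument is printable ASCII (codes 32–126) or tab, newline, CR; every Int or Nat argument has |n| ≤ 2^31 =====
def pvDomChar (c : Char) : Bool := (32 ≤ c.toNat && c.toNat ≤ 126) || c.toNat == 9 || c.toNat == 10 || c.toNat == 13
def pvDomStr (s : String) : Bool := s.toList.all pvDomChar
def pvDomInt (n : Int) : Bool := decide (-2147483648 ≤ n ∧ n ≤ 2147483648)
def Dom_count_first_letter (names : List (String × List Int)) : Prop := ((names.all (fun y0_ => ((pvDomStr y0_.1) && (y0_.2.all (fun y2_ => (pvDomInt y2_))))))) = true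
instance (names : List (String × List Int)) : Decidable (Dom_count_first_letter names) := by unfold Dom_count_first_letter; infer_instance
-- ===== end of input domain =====

-- B replaces A's conditional bucket-initialisation loop by an ordered dedup of the first
-- letters (dict.fromkeys) followed by a per-letter sum comprehension over the items (simpler).

-- key[0] in Python yields a 1-character string; shared by both ports ('' default is
-- unreachable under Pre_, which excludes the empty keys on which Python raises IndexError)
def pvFirst (k : String) : String := String.ofList [(PySem.Str.pyGet? k 0).getD ' ']

-- ===== PORT A =====
def count_first_letter (names : List (String × List Int)) : List (String × Int) :=
  let nd := PySem.Dict.ofList names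
  (nd.keys.foldl (fun letters key =>
      let fl := pvFirst key
      let letters := if letters.contains fl then letters else letters.insert fl (0 : Int)
      letters.modify fl 0 (· + ((nd.getD key []).length : Int)))
    PySem.Dict.empty).items

-- ===== PORT B =====
def count_first_letter_alt (names : List (String × List Int)) : List (String × Int) :=
  let nd := PySem.Dict.ofList names
  let order := PySem.List.dedup (nd.keys.map pvFirst)
  (order.foldl (fun res c =>
      res.insert c (nd.items.foldl
        (fun acc kv => if pvFirst kv.1 == c then acc + (kv.2.length : Int) else acc) 0))
    PySem.Dict.empty).items

-- ===== PRECONDITION & SPEC =====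
-- Pre_ excludes dicts with an empty-string key, on which the Python A raises IndexError (key[0]).
def Pre_count_first_letter (names : List (String × List Int)) : Prop :=
  ∀ kv ∈ names, kv.1 ≠ ""
instance (names : List (String × List Int)) : Decidable (Pre_count_first_letter names) := by
  unfold Pre_count_first_letter; infer_instance
def pvWitness_count_first_letter : (List (String × List Int)) := [("ab", [1, 2]), ("ba", [3])]
def Spec_count_first_letter (names : List (String × List Int)) (out : List (String × Int)) : Prop := out = count_first_letter_alt names
instance (names : List (String × List Int)) (out : List (String × Int)) : Decidable (Spec_count_first_letter names out) := by unfold Spec_count_first_letter; infer_instance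

-- ===== CLAIM (what is proved, stated in full; the proofs are below) =====
def Claim_equal_count_first_letter : Prop := ∀ (names : List (String × List Int)), Dom_count_first_letter names → Pre_count_first_letter names → Spec_count_first_letter names (count_first_letter names)

-- ===== LEMMAS AND PROOFS =====

-- A's loop body (initialise-if-absent, then +=) is one dictionary insert
lemma pv_stepA (d : PySem.Dict String Int) (c : String) (v : Int) :
    (if d.contains c then d else d.insert c (0 : Int)).modify c 0 (· + v)
      = d.insert c (d.getD c 0 + v) := by
  by_cases h : d.contains c = true
  · simp [h, PySem.Dict.modify]
  · simp only [Bool.not_eq_true] at h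
    simp [h, PySem.Dict.modify, PySem.Dict.getD_insert_self,
      PySem.Dict.insert_insert_self, PySem.Dict.getD_of_not_contains _ _ h]

-- the per-letter total accumulated over the processed keys
def pvSumW (f : String → String) (w : String → Int) (ks : List String) (c : String) : Int :=
  (ks.map (fun k => if f k == c then w k else 0)).sum

lemma pv_sumW_zero (f : String → String) (w : String → Int) (ks : List String) (c : String)
    (h : c ∉ ks.map f) : pvSumW f w ks c = 0 := by
  apply List.sum_eq_zero
  intro x hx
  simp only [List.mem_map] at hx
  obtain ⟨k, hk, rfl⟩ := hx
  have : f k ≠ c := fun he => h (he ▸ List.mem_map_of_mem hk)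
  simp [this]

-- characterisation of A's accumulation loop: items = first letters in first-occurrence
-- order, each paired with its total weight
lemma pv_items_fold (f : String → String) (w : String → Int) (ks : List String) :
    (ks.foldl (fun d k => d.insert (f k) (d.getD (f k) 0 + w k))
        (PySem.Dict.empty : PySem.Dict String Int)).items
      = (PySem.Set.ofList (ks.map f)).map (fun c => (c, pvSumW f w ks c)) := by
  induction ks using List.reverseRecOn with
  | nil => simp [PySem.Dict.empty, PySem.Set.ofList, PySem.Set.empty]
  | append_singleton ks x ih =>
    have hkeys : (ks.foldl (fun d k => d.insert (f k) (d.getD (f k) 0 + w k))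
        (PySem.Dict.empty : PySem.Dict String Int)).keys = PySem.Set.ofList (ks.map f) := by
      rw [PySem.Dict.keys_foldl_insert_key ks f (fun d k => d.getD (f k) 0 + w k),
        PySem.Dict.keys_empty, PySem.Set.update_nil_left]
    have hnd : (ks.foldl (fun d k => d.insert (f k) (d.getD (f k) 0 + w k))
        (PySem.Dict.empty : PySem.Dict String Int)).keys.Nodup := by
      rw [hkeys]; exact PySem.Set.nodup_ofList _
    set F := ks.foldl (fun d k => d.insert (f k) (d.getD (f k) 0 + w k))
        (PySem.Dict.empty : PySem.Dict String Int) with hF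
    have hsum : ∀ c, pvSumW f w (ks ++ [x]) c
        = pvSumW f w ks c + (if f x == c then w x else 0) := by
      intro c; simp [pvSumW]
    have hofl : PySem.Set.ofList ((ks ++ [x]).map f)
        = PySem.Set.add (PySem.Set.ofList (ks.map f)) (f x) := by
      rw [List.map_append, PySem.Set.ofList_append]
      simp [PySem.Set.update, PySem.Set.ofList, List.foldl]
    rw [List.foldl_append, List.foldl_cons, List.foldl_nil]
    by_cases hc : f x ∈ ks.map f
    · have hcont : F.contains (f x) = true := by
        rw [PySem.Dict.contains_iff_mem_keys, hkeys, PySem.Set.mem_ofList]; exact hc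
      have hget : F.getD (f x) 0 = pvSumW f w ks (f x) := by
        apply PySem.Dict.getD_of_mem_items _ _ hnd
        rw [ih]
        exact List.mem_map_of_mem (by rwa [PySem.Set.mem_ofList])
      rw [PySem.Dict.items_insert_of_contains _ _ hcont, ih, hget, hofl]
      have hadd : PySem.Set.add (PySem.Set.ofList (ks.map f)) (f x)
          = PySem.Set.ofList (ks.map f) := by
        simp [PySem.Set.add, PySem.Set.contains, PySem.Set.mem_ofList, hc]
      rw [hadd, List.map_map]
      apply List.map_congr_left
      intro c _
      by_cases hcx : c = f x
      · subst hcx; simp [hsum]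
      · have hbe : (f x == c) = false := by
          simp only [beq_eq_false_iff_ne]; exact fun h => hcx h.symm
        simp [hsum, hbe]
        exact fun h => absurd h hcx
    · have hcont : F.contains (f x) = false := by
        rw [← Bool.not_eq_true, PySem.Dict.contains_iff_mem_keys, hkeys, PySem.Set.mem_ofList]
        exact hc
      rw [PySem.Dict.items_insert_of_not_contains _ _ hcont, ih,
        PySem.Dict.getD_of_not_contains _ _ hcont, hofl]
      have hadd : PySem.Set.add (PySem.Set.ofList (ks.map f)) (f x)
          = PySem.Set.ofList (ks.map f) ++ [f x] := by
        simp [PySem.Set.add, PySem.Set.contains, PySem.Set.mem_ofList, hc]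
      rw [hadd, List.map_append]
      congr 1
      · apply List.map_congr_left
        intro c hcm
        rw [PySem.Set.mem_ofList] at hcm
        have : (f x == c) = false := by
          simp only [beq_eq_false_iff_ne]; exact fun he => hc (he ▸ hcm)
        simp [hsum, this]
      · simp [hsum, pv_sumW_zero f w ks (f x) hc]

-- B's inner comprehension computes exactly that total weight
lemma pv_sum_items (nd : PySem.Dict String (List Int)) (hnd : nd.keys.Nodup) (c : String) :
    nd.items.foldl
        (fun acc kv => if pvFirst kv.1 == c then acc + (kv.2.length : Int) else acc) 0
      = pvSumW pvFirst (fun k => ((nd.getD k []).length : Int)) nd.keys c := by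
  rw [PySem.Dict.items_eq_map_keys nd hnd [], List.foldl_map]
  have hfun : (fun (acc : Int) (k : String) =>
      if pvFirst k == c then acc + ((nd.getD k []).length : Int) else acc)
      = fun acc k => acc + (if pvFirst k == c then ((nd.getD k []).length : Int) else 0) := by
    funext acc k; by_cases h : pvFirst k == c <;> simp [h]
  simp only [hfun]
  rw [PySem.List.foldl_add]
  simp [pvSumW]

lemma pv_main (names : List (String × List Int)) :
    count_first_letter names = count_first_letter_alt names := by
  unfold count_first_letter count_first_letter_alt
  set nd := PySem.Dict.ofList names with hnd
  have hstep : (fun (letters : PySem.Dict String Int) (key : String) =>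
        (if letters.contains (pvFirst key) then letters
         else letters.insert (pvFirst key) (0 : Int)).modify (pvFirst key) 0
          (· + ((nd.getD key []).length : Int)))
      = fun letters key =>
        letters.insert (pvFirst key)
          (letters.getD (pvFirst key) 0 + ((nd.getD key []).length : Int)) := by
    funext d k; exact pv_stepA d (pvFirst k) _
  show (nd.keys.foldl _ PySem.Dict.empty).items = _
  rw [hstep, pv_items_fold pvFirst (fun k => ((nd.getD k []).length : Int)) nd.keys]
  have hfresh : ((PySem.List.dedup (nd.keys.map pvFirst)).foldl
      (fun res c => res.insert c (nd.items.foldl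
        (fun acc kv => if pvFirst kv.1 == c then acc + (kv.2.length : Int) else acc) 0))
      (PySem.Dict.empty : PySem.Dict String Int)).items
      = (PySem.List.dedup (nd.keys.map pvFirst)).map (fun c => (c,
          nd.items.foldl
            (fun acc kv => if pvFirst kv.1 == c then acc + (kv.2.length : Int) else acc) 0)) := by
    have := PySem.Dict.items_foldl_insert_fresh
      (PySem.List.dedup (nd.keys.map pvFirst)) (fun c => c)
      (fun c => nd.items.foldl
        (fun acc kv => if pvFirst kv.1 == c then acc + (kv.2.length : Int) else acc) 0)
      (PySem.Dict.empty : PySem.Dict String Int)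
      (by intro a _; simp [PySem.Dict.contains_empty])
      (by unfold PySem.List.dedup; rw [List.map_id']; exact PySem.Set.nodup_ofList (nd.keys.map pvFirst))
    simpa [PySem.Dict.empty] using this
  rw [hfresh]
  unfold PySem.List.dedup
  apply List.map_congr_left
  intro c _
  rw [pv_sum_items nd (hnd ▸ PySem.Dict.nodup_keys_ofList names) c]

-- ===== VERDICT (by name: the statement is the Claim_ definition above) =====
theorem count_first_letter_spec : Claim_equal_count_first_letter := by
  intro names _ _
  unfold Spec_count_first_letter
  exact pv_main names
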